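-- pv_equiv track=rewrite | github.com/jain14aditya/c3pa | utilities.py | load_query_labels
-- ===== SOURCE A (Python) =====
-- flatten = lambda l: [item for sublist in l for item in sublist]
--
-- def load_query_labels(persona_a, persona_b, chat):
--     '''generates multiple queries and the corresponding actual human responses for a chat'''
--     queries = []
--     labels = []
--     query_len = []
--
--     for bot in range(2):
--         bot_persona = persona_a if bot%2 == 0 else persona_b
--         for i in range(len(chat)):
--             if i%2 == bot%2:
--                 bot_input_ids = [bot_persona + flatten(chat[:i])]
--                 queries.append(bot_input_ids)
--                 labels.append(chat[i])
--                 query_len.append(i)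
--
--     assert(len(chat) == len(queries))
--     return queries, labels, query_len
-- ===== SOURCE B (Python) =====
-- def load_query_labels(persona_a, persona_b, chat):
--     '''generates multiple queries and the corresponding actual human responses for a chat'''
--     even_q, even_l, even_i = [], [], []
--     odd_q, odd_l, odd_i = [], [], []
--     prefix = []
--     for i, turn in enumerate(chat):
--         if i % 2 == 0:
--             even_q.append([persona_a + prefix])
--             even_l.append(turn)
--             even_i.append(i)
--         else:
--             odd_q.append([persona_b + prefix])
--             odd_l.append(turn)
--             odd_i.append(i)
--         prefix = prefix + turn
--     queries = even_q + odd_q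
--     labels = even_l + odd_l
--     query_len = even_i + odd_i
--     assert(len(chat) == len(queries))
--     return queries, labels, query_len
-- ===== Notes on version B (the rewrite author's own statement) =====
-- stated objective: alternative
-- what changed: Replaces the two parity-guarded passes that each recompute flatten(chat[:i]) by slicing and re-flattening with one forward pass maintaining an incremental running prefix, collecting even/odd entries in separate lists and concatenating even-then-odd afterwards.
import Mathlib
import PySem

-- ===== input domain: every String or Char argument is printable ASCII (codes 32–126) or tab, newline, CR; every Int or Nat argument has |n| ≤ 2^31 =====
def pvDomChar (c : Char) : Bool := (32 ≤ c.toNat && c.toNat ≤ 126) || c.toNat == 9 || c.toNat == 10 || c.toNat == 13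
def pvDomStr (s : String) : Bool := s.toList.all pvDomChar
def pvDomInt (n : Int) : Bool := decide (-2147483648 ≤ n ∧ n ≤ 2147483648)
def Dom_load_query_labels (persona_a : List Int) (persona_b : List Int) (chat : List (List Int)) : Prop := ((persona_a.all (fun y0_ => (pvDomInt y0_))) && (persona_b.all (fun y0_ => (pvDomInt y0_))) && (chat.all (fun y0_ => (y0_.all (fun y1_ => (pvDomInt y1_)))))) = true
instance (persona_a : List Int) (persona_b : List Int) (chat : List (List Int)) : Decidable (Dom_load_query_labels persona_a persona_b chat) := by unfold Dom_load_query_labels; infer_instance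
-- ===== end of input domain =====

-- B replaces A's two parity-guarded passes (each recomputing flatten(chat[:i]) from scratch) with one
-- forward pass keeping an incremental running prefix, collecting even/odd entries separately and
-- concatenating even-then-odd; the return values are proved equal on all inputs (no Pre_ is needed:
-- A's assert compares len(chat) with len(queries), which are always equal, so A never raises).

-- ===== PORT A =====
-- flatten = lambda l: [item for sublist in l for item in sublist]
def pvFlatten (l : List (List Int)) : List Int := l.flatMap (fun sublist => sublist)

-- the inner 'for i in range(len(chat))' loop of A, for one value of 'bot'
-- (bot_input_ids = [bot_persona + flatten(chat[:i])]; chat[i] is always in range here, so pyGetD is exact)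
def lqlInner (chat : List (List Int)) (bot_persona : List Int) (bot : Int)
    (acc : List (List (List Int)) × List (List Int) × List Int) :
    List (List (List Int)) × List (List Int) × List Int :=
  (PySem.List.pyRange 0 (chat.length : Int) 1).foldl (fun acc i =>
    if PySem.Int.mod i 2 == PySem.Int.mod bot 2 then
      (acc.1 ++ [[bot_persona ++ pvFlatten (PySem.List.slice chat none (some i))]],
       acc.2.1 ++ [PySem.List.pyGetD chat i []], acc.2.2 ++ [i])
    else acc) acc

def load_query_labels (persona_a : List Int) (persona_b : List Int) (chat : List (List Int)) : List (List (List Int)) × List (List Int) × List Int :=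
  -- the final 'assert len(chat) == len(queries)' always holds (one entry is produced per chat turn), so it never aborts
  (PySem.List.pyRange 0 2 1).foldl (fun acc bot =>
    lqlInner chat (if PySem.Int.mod bot 2 == 0 then persona_a else persona_b) bot acc)
    ([], [], [])

-- ===== PORT B =====
-- one step of B's single forward pass: state = (even triple, odd triple, running prefix)
def lqlStep (persona_a : List Int) (persona_b : List Int)
    (s : (List (List (List Int)) × List (List Int) × List Int) ×
         (List (List (List Int)) × List (List Int) × List Int) × List Int)
    (p : Int × List Int) :
    (List (List (List Int)) × List (List Int) × List Int) ×
    (List (List (List Int)) × List (List Int) × List Int) × List Int :=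
  let i := p.1
  let turn := p.2
  let ev := s.1
  let od := s.2.1
  let pre := s.2.2
  if PySem.Int.mod i 2 == 0 then
    ((ev.1 ++ [[persona_a ++ pre]], ev.2.1 ++ [turn], ev.2.2 ++ [i]), od, pre ++ turn)
  else
    (ev, (od.1 ++ [[persona_b ++ pre]], od.2.1 ++ [turn], od.2.2 ++ [i]), pre ++ turn)

def load_query_labels_alt (persona_a : List Int) (persona_b : List Int) (chat : List (List Int)) : List (List (List Int)) × List (List Int) × List Int :=
  let st := (PySem.List.enumerate chat 0).foldl (lqlStep persona_a persona_b)
    (([], [], []), ([], [], []), [])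
  (st.1.1 ++ st.2.1.1, st.1.2.1 ++ st.2.1.2.1, st.1.2.2 ++ st.2.1.2.2)

-- ===== PRECONDITION & SPEC =====
def Spec_load_query_labels (persona_a : List Int) (persona_b : List Int) (chat : List (List Int)) (out : List (List (List Int)) × List (List Int) × List Int) : Prop := out = load_query_labels_alt persona_a persona_b chat
instance (persona_a : List Int) (persona_b : List Int) (chat : List (List Int)) (out : List (List (List Int)) × List (List Int) × List Int) : Decidable (Spec_load_query_labels persona_a persona_b chat out) := by unfold Spec_load_query_labels; infer_instance

-- ===== CLAIM (what is proved, stated in full; the proofs are below) =====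
def Claim_equal_load_query_labels : Prop := ∀ (persona_a : List Int) (persona_b : List Int) (chat : List (List Int)), Dom_load_query_labels persona_a persona_b chat → Spec_load_query_labels persona_a persona_b chat (load_query_labels persona_a persona_b chat)

-- ===== LEMMAS AND PROOFS =====

-- reference function: the even-parity and odd-parity entry triples of the suffix 'ts' of the chat,
-- when 'ts' starts at global index k with accumulated prefix 'pre'
def lqlCore (pa pb : List Int) :
    List (List Int) → Int → List Int →
    (List (List (List Int)) × List (List Int) × List Int) ×
    (List (List (List Int)) × List (List Int) × List Int)
  | [], _, _ => (([], [], []), ([], [], []))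
  | t :: ts, k, pre =>
    let r := lqlCore pa pb ts (k + 1) (pre ++ t)
    if PySem.Int.mod k 2 = 0 then
      (([pa ++ pre] :: r.1.1, t :: r.1.2.1, k :: r.1.2.2), r.2)
    else
      (r.1, ([pb ++ pre] :: r.2.1, t :: r.2.2.1, k :: r.2.2.2))

theorem pvMod2_cases (k : Int) : PySem.Int.mod k 2 = 0 ∨ PySem.Int.mod k 2 = 1 := by
  simp [PySem.Int.mod, Int.fmod_eq_emod]; omega

theorem pvGetElem?_drop_cons {α : Type} (l : List α) (m : Nat) (t : α) (ts : List α)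
    (h : l.drop m = t :: ts) : l[m]? = some t := by
  have h2 : (l.drop m)[0]? = l[m + 0]? := List.getElem?_drop
  rw [h] at h2; simpa using h2.symm

theorem pvFlatten_take_succ (chat : List (List Int)) (m : Nat) (t : List Int) (ts : List (List Int))
    (h : chat.drop m = t :: ts) :
    pvFlatten (chat.take (m + 1)) = pvFlatten (chat.take m) ++ t := by
  rw [List.take_add_one]
  simp [pvFlatten, pvGetElem?_drop_cons chat m t ts h]

theorem pvGetD_drop_cons (chat : List (List Int)) (m : Nat) (t : List Int) (ts : List (List Int))
    (h : chat.drop m = t :: ts) :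
    PySem.List.pyGetD chat (m : Int) [] = t := by
  rw [PySem.List.pyGetD_natCast]
  simp [List.getD, pvGetElem?_drop_cons chat m t ts h]

-- A's inner loop over indices k..len-1 with persona bp and parity p appends exactly the matching
-- component of lqlCore bp bp
theorem lqlInner_eq (chat : List (List Int)) (bp : List Int) (p : Int) (hp : p = 0 ∨ p = 1) :
    ∀ (ts : List (List Int)) (k : Int), 0 ≤ k → chat.drop k.toNat = ts →
    ∀ (Q : List (List (List Int))) (L : List (List Int)) (K : List Int),
    (PySem.List.pyRange k (chat.length : Int) 1).foldl (fun acc i =>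
      if PySem.Int.mod i 2 == p then
        (acc.1 ++ [[bp ++ pvFlatten (PySem.List.slice chat none (some i))]],
         acc.2.1 ++ [PySem.List.pyGetD chat i []], acc.2.2 ++ [i])
      else acc) (Q, L, K)
    = (if p = 0 then
         (Q ++ (lqlCore bp bp ts k (pvFlatten (chat.take k.toNat))).1.1,
          L ++ (lqlCore bp bp ts k (pvFlatten (chat.take k.toNat))).1.2.1,
          K ++ (lqlCore bp bp ts k (pvFlatten (chat.take k.toNat))).1.2.2)
       else
         (Q ++ (lqlCore bp bp ts k (pvFlatten (chat.take k.toNat))).2.1,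
          L ++ (lqlCore bp bp ts k (pvFlatten (chat.take k.toNat))).2.2.1,
          K ++ (lqlCore bp bp ts k (pvFlatten (chat.take k.toNat))).2.2.2)) := by
  intro ts
  induction ts with
  | nil =>
    intro k hk hdrop Q L K
    have hlen : (chat.length : Int) ≤ k := by
      by_contra hlt
      have : k.toNat < chat.length := by omega
      rw [List.drop_eq_nil_iff] at hdrop
      omega
    rw [PySem.List.pyRange_one_eq_nil hlen]
    rcases hp with h | h <;> simp [h, lqlCore]
  | cons t ts ih =>
    intro k hk hdrop Q L K
    have hm : k.toNat < chat.length := by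
      by_contra hge
      rw [List.drop_eq_nil_of_le (Nat.le_of_not_lt hge)] at hdrop
      simp at hdrop
    have hklt : k < (chat.length : Int) := by omega
    rw [PySem.List.pyRange_one_cons hklt]
    simp only [List.foldl_cons]
    have hdrop' : chat.drop (k + 1).toNat = ts := by
      have h1 : (k + 1).toNat = k.toNat + 1 := by omega
      rw [h1, ← List.drop_drop, hdrop]
      simp
    have hkcast : ((k.toNat : Nat) : Int) = k := Int.toNat_of_nonneg hk
    have hslice : PySem.List.slice chat none (some k) = chat.take k.toNat := by
      rw [← hkcast, PySem.List.slice_to_natCast]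
      simp only [List.take_eq_take_iff]
      omega
    have hget : PySem.List.pyGetD chat k [] = t := by
      rw [← hkcast]; exact pvGetD_drop_cons chat k.toNat t ts hdrop
    have hpre : pvFlatten (chat.take (k + 1).toNat) = pvFlatten (chat.take k.toNat) ++ t := by
      have h1 : (k + 1).toNat = k.toNat + 1 := by omega
      rw [h1]; exact pvFlatten_take_succ chat k.toNat t ts hdrop
    rcases pvMod2_cases k with hpar | hpar <;> rcases hp with h | h <;> subst h
    · -- even index, p = 0: entry collected into the even component
      rw [show (PySem.Int.mod k 2 == (0 : Int)) = true from by rw [hpar]; rfl]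
      simp only [reduceIte]
      rw [ih (k + 1) (by omega) hdrop']
      simp only [lqlCore, if_pos hpar]
      simp [hpre, hslice, hget]
    · -- even index, p = 1: entry skipped
      rw [show (PySem.Int.mod k 2 == (1 : Int)) = false from by rw [hpar]; rfl]
      simp only [Bool.false_eq_true, if_false]
      rw [ih (k + 1) (by omega) hdrop']
      simp only [if_neg (by decide : ¬ (1 : Int) = 0)]
      simp only [lqlCore, if_pos hpar]
      simp [hpre]
    · -- odd index, p = 0: entry skipped
      rw [show (PySem.Int.mod k 2 == (0 : Int)) = false from by rw [hpar]; rfl]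
      simp only [Bool.false_eq_true, if_false]
      rw [ih (k + 1) (by omega) hdrop']
      simp only [reduceIte]
      simp only [lqlCore, if_neg (by rw [hpar]; decide : ¬ PySem.Int.mod k 2 = 0)]
      simp [hpre]
    · -- odd index, p = 1: entry collected into the odd component
      rw [show (PySem.Int.mod k 2 == (1 : Int)) = true from by rw [hpar]; rfl]
      simp only [reduceIte]
      rw [ih (k + 1) (by omega) hdrop']
      simp only [lqlCore, if_neg (by rw [hpar]; decide : ¬ PySem.Int.mod k 2 = 0)]
      simp only [if_neg (by decide : ¬ (1 : Int) = 0)]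
      simp [hpre, hslice, hget]

-- B's single pass appends both components of lqlCore and extends the prefix by the flattened suffix
theorem lqlFold_eq (pa pb : List Int) :
    ∀ (ts : List (List Int)) (k : Int) (pre : List Int)
      (Q Q2 : List (List (List Int))) (L L2 : List (List Int)) (K K2 : List Int),
    (PySem.List.enumerate ts k).foldl (lqlStep pa pb) ((Q, L, K), (Q2, L2, K2), pre)
    = ((Q ++ (lqlCore pa pb ts k pre).1.1, L ++ (lqlCore pa pb ts k pre).1.2.1,
        K ++ (lqlCore pa pb ts k pre).1.2.2),
       (Q2 ++ (lqlCore pa pb ts k pre).2.1, L2 ++ (lqlCore pa pb ts k pre).2.2.1,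
        K2 ++ (lqlCore pa pb ts k pre).2.2.2), pre ++ pvFlatten ts) := by
  intro ts
  induction ts with
  | nil =>
    intro k pre Q Q2 L L2 K K2
    simp [PySem.List.enumerate_nil, lqlCore, pvFlatten]
  | cons t ts ih =>
    intro k pre Q Q2 L L2 K K2
    rw [PySem.List.enumerate_cons]
    simp only [List.foldl_cons]
    rcases pvMod2_cases k with hpar | hpar
    · have hbool : (PySem.Int.mod k 2 == (0 : Int)) = true := by rw [hpar]; rfl
      rw [show lqlStep pa pb ((Q, L, K), (Q2, L2, K2), pre) (k, t)
            = ((Q ++ [[pa ++ pre]], L ++ [t], K ++ [k]), (Q2, L2, K2), pre ++ t) from by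
          simp only [lqlStep, hbool, reduceIte]]
      rw [ih (k + 1) (pre ++ t)]
      simp only [lqlCore, if_pos hpar]
      simp [pvFlatten]
    · have hbool : (PySem.Int.mod k 2 == (0 : Int)) = false := by rw [hpar]; rfl
      rw [show lqlStep pa pb ((Q, L, K), (Q2, L2, K2), pre) (k, t)
            = ((Q, L, K), (Q2 ++ [[pb ++ pre]], L2 ++ [t], K2 ++ [k]), pre ++ t) from by
          simp only [lqlStep, hbool, Bool.false_eq_true, if_false]]
      rw [ih (k + 1) (pre ++ t)]
      simp only [lqlCore, if_neg (by rw [hpar]; decide : ¬ PySem.Int.mod k 2 = 0)]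
      simp [pvFlatten]

-- the even component does not depend on pb, the odd component does not depend on pa
theorem lqlCore_fst (pa pb pb' : List Int) :
    ∀ (ts : List (List Int)) (k : Int) (pre : List Int),
    (lqlCore pa pb ts k pre).1 = (lqlCore pa pb' ts k pre).1 := by
  intro ts
  induction ts with
  | nil => intro k pre; simp [lqlCore]
  | cons t ts ih =>
    intro k pre
    rcases pvMod2_cases k with hpar | hpar
    · simp only [lqlCore, if_pos hpar]
      simp [ih (k + 1) (pre ++ t)]
    · simp only [lqlCore, if_neg (by rw [hpar]; decide : ¬ PySem.Int.mod k 2 = 0)]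
      exact ih (k + 1) (pre ++ t)

theorem lqlCore_snd (pa pa' pb : List Int) :
    ∀ (ts : List (List Int)) (k : Int) (pre : List Int),
    (lqlCore pa pb ts k pre).2 = (lqlCore pa' pb ts k pre).2 := by
  intro ts
  induction ts with
  | nil => intro k pre; simp [lqlCore]
  | cons t ts ih =>
    intro k pre
    rcases pvMod2_cases k with hpar | hpar
    · simp only [lqlCore, if_pos hpar]
      exact ih (k + 1) (pre ++ t)
    · simp only [lqlCore, if_neg (by rw [hpar]; decide : ¬ PySem.Int.mod k 2 = 0)]
      simp [ih (k + 1) (pre ++ t)]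

theorem pyRange_0_2 : PySem.List.pyRange 0 2 1 = [0, 1] := by decide

-- the two ports agree on every input (the Dom hypothesis is not needed)
theorem lql_main_eq (pa pb : List Int) (chat : List (List Int)) :
    load_query_labels pa pb chat = load_query_labels_alt pa pb chat := by
  unfold load_query_labels load_query_labels_alt lqlInner
  rw [pyRange_0_2]
  simp only [List.foldl_cons, List.foldl_nil]
  rw [show PySem.Int.mod (0 : Int) 2 = 0 from by decide,
      show PySem.Int.mod (1 : Int) 2 = 1 from by decide]
  simp only [show ((0 : Int) == 0) = true from rfl, show ((1 : Int) == 0) = false from rfl,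
    Bool.false_eq_true, if_false, reduceIte]
  rw [lqlInner_eq chat pa 0 (Or.inl rfl) chat 0 le_rfl (by simp)]
  rw [lqlInner_eq chat pb 1 (Or.inr rfl) chat 0 le_rfl (by simp)]
  rw [lqlFold_eq pa pb chat 0 [] [] [] [] [] [] []]
  simp only [if_neg (by decide : ¬ (1 : Int) = 0), reduceIte]
  have h1 := lqlCore_fst pa pa pb chat 0 []
  have h2 := lqlCore_snd pb pa pb chat 0 []
  simp [pvFlatten, h1, h2]

-- ===== VERDICT (by name: the statement is the Claim_ definition above) =====
theorem load_query_labels_spec : Claim_equal_load_query_labels := by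
  intro pa pb chat _
  unfold Spec_load_query_labels
  exact lql_main_eq pa pb chat
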